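-- pv_equiv track=rewrite | github.com/keichi/foobar | lovely-lucky-lambs/solution.py | solution
-- ===== SOURCE A (Python) =====
-- def solution(total_lambs):
--     tmp = total_lambs
--     cur = 1
--     generous = 0
--     while tmp >= cur:
--         tmp -= cur
--         cur *= 2
--         generous += 1
--
--     tmp = total_lambs
--     cur, prev = 1, 0
--     stingy = 0
--     while tmp >= cur:
--         tmp -= cur
--         prev, cur = cur, prev + cur
--         stingy += 1
--
--     return stingy - generous
-- ===== SOURCE B (Python) =====
-- def solution(total_lambs):
--     if total_lambs < 1:
--         return 0
--     generous = (total_lambs + 1).bit_length() - 1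
--     a, b = 1, 2
--     stingy = 0
--     while b - 1 <= total_lambs:
--         a, b = b, a + b
--         stingy += 1
--     return stingy - generous
-- ===== Notes on version B (the rewrite author's own statement) =====
-- stated objective: simpler
-- what changed: B replaces A's doubling subtraction loop by the closed form (total_lambs+1).bit_length()-1 for the generous count and computes the stingy count by advancing a Fibonacci pair compared against the fixed total instead of destructively subtracting terms from a running remainder.
import Mathlib
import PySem

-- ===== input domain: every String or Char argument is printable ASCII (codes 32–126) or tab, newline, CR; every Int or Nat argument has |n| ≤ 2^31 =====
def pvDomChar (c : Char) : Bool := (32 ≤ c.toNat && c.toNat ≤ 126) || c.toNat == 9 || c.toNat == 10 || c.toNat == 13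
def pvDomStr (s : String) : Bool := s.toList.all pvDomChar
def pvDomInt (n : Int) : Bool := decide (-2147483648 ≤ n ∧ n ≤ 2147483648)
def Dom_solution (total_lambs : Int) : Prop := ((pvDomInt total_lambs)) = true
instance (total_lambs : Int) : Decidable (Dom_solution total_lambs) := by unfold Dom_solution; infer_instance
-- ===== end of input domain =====

-- B replaces A's doubling loop by the closed form (total_lambs+1).bit_length()-1 and counts
-- Fibonacci prefix sums directly instead of destructively subtracting them; objective: simpler.

-- ===== PORT A =====
-- the first 'while tmp >= cur' loop of A (generous); the proof argument only justifies
-- termination (the loop is only ever entered with cur = 1)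
def genLoopA (tmp cur generous : Int) (h : 1 ≤ cur) : Int :=
  if h' : tmp ≥ cur then genLoopA (tmp - cur) (cur * 2) (generous + 1) (by omega) else generous
termination_by tmp.toNat
decreasing_by omega

-- the second 'while tmp >= cur' loop of A (stingy)
def stinLoopA (tmp cur prev stingy : Int) (h : 1 ≤ cur ∧ 0 ≤ prev) : Int :=
  if h' : tmp ≥ cur then stinLoopA (tmp - cur) (prev + cur) cur (stingy + 1) (by omega) else stingy
termination_by tmp.toNat
decreasing_by omega

def solution (total_lambs : Int) : Int :=
  let generous := genLoopA total_lambs 1 0 (by omega)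
  let stingy := stinLoopA total_lambs 1 0 0 (by omega)
  stingy - generous

-- ===== PORT B =====
-- hand port of Python's m.bit_length(), exact for m ≥ 0 (B only calls it with m ≥ 2)
def bitLength (m : Int) : Int :=
  if h : m ≤ 0 then 0 else 1 + bitLength (m / 2)
termination_by m.toNat
decreasing_by omega

-- B's 'while b - 1 <= total_lambs' loop over the Fibonacci pair (a, b)
def stinLoopB (a b stingy n : Int) (h : 1 ≤ a ∧ a ≤ b) : Int :=
  if h' : b - 1 ≤ n then stinLoopB b (a + b) (stingy + 1) n (by omega) else stingy
termination_by (n + 2 - b).toNat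
decreasing_by omega

def solution_alt (total_lambs : Int) : Int :=
  if total_lambs < 1 then 0
  else
    let generous := bitLength (total_lambs + 1) - 1
    let stingy := stinLoopB 1 2 0 total_lambs (by omega)
    stingy - generous

-- ===== PRECONDITION & SPEC =====
def Spec_solution (total_lambs : Int) (out : Int) : Prop := out = solution_alt total_lambs
instance (total_lambs : Int) (out : Int) : Decidable (Spec_solution total_lambs out) := by unfold Spec_solution; infer_instance

-- ===== CLAIM (what is proved, stated in full; the proofs are below) =====
def Claim_equal_solution : Prop := ∀ (total_lambs : Int), Dom_solution total_lambs → Spec_solution total_lambs (solution total_lambs)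

-- ===== LEMMAS AND PROOFS =====

-- the counter argument of A's generous loop is a pure offset
theorem genLoopA_offset (n : Nat) : ∀ (t c g : Int) (h : 1 ≤ c), t.toNat ≤ n →
    genLoopA t c g h = g + genLoopA t c 0 h := by
  induction n with
  | zero =>
    intro t c g h hn
    rw [genLoopA, dif_neg (by omega)]
    rw [genLoopA, dif_neg (by omega)]
    omega
  | succ n ih =>
    intro t c g h hn
    have hc2 : (1:Int) ≤ c * 2 := by omega
    by_cases h' : c ≤ t
    · rw [genLoopA, dif_pos (by omega : t ≥ c)]
      conv_rhs => rw [genLoopA, dif_pos (by omega : t ≥ c)]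
      rw [show (genLoopA (t - c) (c * 2) (g + 1) (by omega) : Int) =
            genLoopA (t - c) (c * 2) (g + 1) hc2 from rfl]
      rw [show (genLoopA (t - c) (c * 2) (0 + 1) (by omega) : Int) =
            genLoopA (t - c) (c * 2) (0 + 1) hc2 from rfl]
      rw [ih (t - c) (c * 2) (g + 1) hc2 (by omega),
          ih (t - c) (c * 2) (0 + 1) hc2 (by omega)]
      generalize genLoopA (t - c) (c * 2) 0 hc2 = X
      omega
    · rw [genLoopA, dif_neg (by omega)]
      rw [genLoopA, dif_neg (by omega)]
      omega

-- halving both tmp and cur (up to the dropped parity bit) does not change the step count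
theorem genLoopA_scale (n : Nat) : ∀ (t c r g : Int) (hc : 1 ≤ c) (h2 : 1 ≤ 2 * c),
    t.toNat ≤ n → (r = 0 ∨ r = 1) →
    genLoopA (2 * t + r) (2 * c) g h2 = genLoopA t c g hc := by
  induction n with
  | zero =>
    intro t c r g hc h2 hn hr
    rw [genLoopA, dif_neg (by omega)]
    rw [genLoopA, dif_neg (by omega)]
  | succ n ih =>
    intro t c r g hc h2 hn hr
    by_cases h' : c ≤ t
    · have hc2 : (1:Int) ≤ c * 2 := by omega
      have h22 : (1:Int) ≤ 2 * (c * 2) := by omega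
      rw [genLoopA, dif_pos (by omega : 2 * t + r ≥ 2 * c)]
      conv_rhs => rw [genLoopA, dif_pos (by omega : t ≥ c)]
      rw [show (genLoopA (2 * t + r - 2 * c) (2 * c * 2) (g + 1) (by omega) : Int) =
            genLoopA (2 * (t - c) + r) (2 * (c * 2)) (g + 1) h22 from by
        congr 1 <;> omega]
      exact ih (t - c) (c * 2) r (g + 1) hc2 h22 (by omega) hr
    · rw [genLoopA, dif_neg (by omega)]
      rw [genLoopA, dif_neg (by omega)]

theorem bitLength_pos (m : Int) (h : 1 ≤ m) : bitLength m = 1 + bitLength (m / 2) := by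
  rw [bitLength, dif_neg (by omega)]

-- A's generous loop equals B's closed form
theorem genLoopA_eq_bitLength (n : Nat) : ∀ (t : Int) (h : (1:Int) ≤ 1), t.toNat ≤ n →
    genLoopA t 1 0 h = if t < 1 then 0 else bitLength (t + 1) - 1 := by
  induction n with
  | zero =>
    intro t h hn
    rw [genLoopA, dif_neg (by omega), if_pos (by omega)]
  | succ n ih =>
    intro t h hn
    by_cases h' : 1 ≤ t
    · have h12 : (1:Int) ≤ 1 * 2 := by omega
      have h21 : (1:Int) ≤ 2 * 1 := by omega
      rw [genLoopA, dif_pos (by omega : t ≥ 1), if_neg (by omega)]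
      rw [show (genLoopA (t - 1) (1 * 2) (0 + 1) (by omega) : Int) =
            genLoopA (t - 1) (1 * 2) (0 + 1) h12 from rfl]
      rw [genLoopA_offset (t - 1).toNat (t - 1) (1 * 2) (0 + 1) h12 (by omega)]
      have hr : (t - 1) % 2 = 0 ∨ (t - 1) % 2 = 1 := by omega
      rw [show (genLoopA (t - 1) (1 * 2) 0 h12 : Int) =
            genLoopA (2 * ((t - 1) / 2) + (t - 1) % 2) (2 * 1) 0 h21 from by
        congr 1 <;> omega]
      rw [genLoopA_scale ((t - 1) / 2).toNat ((t - 1) / 2) 1 ((t - 1) % 2) 0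
            (by omega) h21 (by omega) hr]
      rw [ih ((t - 1) / 2) (by omega) (by omega)]
      have hbl : bitLength (t + 1) = 1 + bitLength ((t + 1) / 2) := bitLength_pos _ (by omega)
      have e : (t + 1) / 2 = (t - 1) / 2 + 1 := by omega
      rw [hbl, e]
      by_cases hm : (t - 1) / 2 < 1
      · have hm0 : (t - 1) / 2 = 0 := by omega
        rw [if_pos hm, hm0]
        rw [show ((0:Int) + 1) = 1 from by omega, bitLength_pos 1 (by omega)]
        rw [show ((1:Int) / 2) = 0 from by omega]
        rw [bitLength, dif_pos (by omega)]
        omega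
      · rw [if_neg hm]
        generalize bitLength ((t - 1) / 2 + 1) = X
        omega
    · rw [genLoopA, dif_neg (by omega), if_pos (by omega)]

-- A's stingy loop and B's Fibonacci-pair loop run in lockstep: a = cur + prev,
-- b = cur + cur + prev, n = tmp + cur + prev - 1
theorem stinLoop_link (n : Nat) : ∀ (tmp cur prev s : Int) (hA : 1 ≤ cur ∧ 0 ≤ prev)
    (hB : 1 ≤ cur + prev ∧ cur + prev ≤ cur + cur + prev), tmp.toNat ≤ n →
    stinLoopA tmp cur prev s hA = stinLoopB (cur + prev) (cur + cur + prev) s (tmp + cur + prev - 1) hB := by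
  induction n with
  | zero =>
    intro tmp cur prev s hA hB hn
    rw [stinLoopA, dif_neg (by omega)]
    rw [stinLoopB, dif_neg (by omega)]
  | succ n ih =>
    intro tmp cur prev s hA hB hn
    by_cases h' : cur ≤ tmp
    · rw [stinLoopA, dif_pos (by omega : tmp ≥ cur)]
      rw [stinLoopB, dif_pos (by omega : cur + cur + prev - 1 ≤ tmp + cur + prev - 1)]
      rw [ih (tmp - cur) (prev + cur) cur (s + 1) (by omega) (by omega) (by omega)]
      congr 1
      all_goals omega
    · rw [stinLoopA, dif_neg (by omega)]
      rw [stinLoopB, dif_neg (by omega)]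

-- ===== VERDICT (by name: the statement is the Claim_ definition above) =====
theorem solution_spec : Claim_equal_solution := by
  intro t _
  show solution t = solution_alt t
  simp only [solution, solution_alt]
  by_cases h : t < 1
  · rw [if_pos h]
    rw [genLoopA, dif_neg (by omega)]
    rw [stinLoopA, dif_neg (by omega)]
    norm_num
  · rw [if_neg h]
    rw [genLoopA_eq_bitLength t.toNat t (by omega) (by omega), if_neg h]
    rw [stinLoop_link t.toNat t 1 0 0 (by omega) (by omega) (by omega)]
    norm_num
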